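-- pv_equiv track=rewrite | github.com/PeterCowling/base-shop | tools/naminglab/features/confusion_proxy.py | simple_metaphone
-- ===== SOURCE A (Python) =====
-- def simple_metaphone(name: str) -> str:
--     """Simplified Metaphone encoding for brand-name tokens.
--
--     Rules (applied in order, on uppercased input with vowels tracked):
--     1. Strip trailing S if name ends in S and len > 4
--     2. Replace: PH->F, CK->K, SCH->SK, QU->KW
--     3. Remove silent initial letters: KN->N, GN->N, AE->E, WR->R
--     4. Replace vowel clusters at start with single 'A'
--     5. Drop all remaining vowels (not at start)
--     6. Compress consecutive identical consonants to one
--     7. Replace: C->K, G->K (before e/i/y), J->Y, V->F, Z->S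
--     8. Return first 6 chars of result (or full if shorter)
--     """
--     if not name:
--         return ''
--
--     s = name.upper()
--
--     # Step 1: Strip trailing S if name ends in S and len > 4
--     if len(s) > 4 and s.endswith('S'):
--         s = s[:-1]
--
--     # Step 2: Replace digraphs/trigraphs
--     s = s.replace('SCH', 'SK')
--     s = s.replace('PH', 'F')
--     s = s.replace('CK', 'K')
--     s = s.replace('QU', 'KW')
--
--     # Step 3: Remove silent initial letters
--     if s.startswith('KN'):
--         s = s[1:]
--     elif s.startswith('GN'):
--         s = s[1:]
--     elif s.startswith('AE'):
--         s = s[1:]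
--     elif s.startswith('WR'):
--         s = s[1:]
--
--     if not s:
--         return ''
--
--     # Step 4: Replace vowel clusters at start with single 'A'
--     VOWELS_UPPER = set('AEIOU')
--     # Find the extent of the initial vowel cluster
--     i = 0
--     while i < len(s) and s[i] in VOWELS_UPPER:
--         i += 1
--     if i > 0:
--         s = 'A' + s[i:]
--
--     if not s:
--         return 'A'
--
--     # Step 5: Drop all remaining vowels (not at start — first char is kept as-is)
--     # First char is preserved; drop internal vowels
--     result = s[0]
--     for ch in s[1:]:
--         if ch not in VOWELS_UPPER:
--             result += ch
--
--     # Step 6: Compress consecutive identical consonants to one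
--     compressed = result[0] if result else ''
--     for ch in result[1:]:
--         if ch != compressed[-1]:
--             compressed += ch
--     result = compressed
--
--     # Step 7: Apply phonetic mappings
--     # C->K, G->K (simple — not context-sensitive for brand names), J->Y, V->F, Z->S
--     mapped = ''
--     for ch in result:
--         if ch == 'C':
--             mapped += 'K'
--         elif ch == 'G':
--             mapped += 'K'
--         elif ch == 'J':
--             mapped += 'Y'
--         elif ch == 'V':
--             mapped += 'F'
--         elif ch == 'Z':
--             mapped += 'S'
--         else:
--             mapped += ch
--     result = mapped
--
--     # Compress again after mapping (e.g. GG -> KK -> K)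
--     compressed = result[0] if result else ''
--     for ch in result[1:]:
--         if ch != compressed[-1]:
--             compressed += ch
--     result = compressed
--
--     # Step 8: Return first 6 chars
--     return result[:6]
-- ===== SOURCE B (Python) =====
-- def simple_metaphone(name: str) -> str:
--     """Simplified Metaphone encoding; fuses A's steps 5-7 into one accumulator pass."""
--     if not name:
--         return ''
--
--     s = name.upper()
--
--     # Step 1: strip trailing S
--     if len(s) > 4 and s.endswith('S'):
--         s = s[:-1]
--
--     # Step 2: digraph/trigraph replacements
--     s = s.replace('SCH', 'SK')
--     s = s.replace('PH', 'F')
--     s = s.replace('CK', 'K')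
--     s = s.replace('QU', 'KW')
--
--     # Step 3: silent initial letters
--     if s[:2] in ('KN', 'GN', 'AE', 'WR'):
--         s = s[1:]
--
--     if not s:
--         return ''
--
--     # Step 4: collapse an initial vowel cluster to a single 'A'
--     vowels = set('AEIOU')
--     i = 0
--     while i < len(s) and s[i] in vowels:
--         i += 1
--     if i > 0:
--         s = 'A' + s[i:]
--
--     # Steps 5-7 fused: drop internal vowels, map phonetically, and
--     # compress adjacent duplicates of the mapped chars, in one pass.
--     phon = {'C': 'K', 'G': 'K', 'J': 'Y', 'V': 'F', 'Z': 'S'}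
--     out = [phon.get(s[0], s[0])]
--     for ch in s[1:]:
--         if ch in vowels:
--             continue
--         m = phon.get(ch, ch)
--         if m != out[-1]:
--             out.append(m)
--
--     return ''.join(out[:6])
-- ===== Notes on version B (the rewrite author's own statement) =====
-- stated objective: simpler
-- what changed: A's steps 5-7 (drop internal vowels, compress duplicates, phonetic map, compress again) are four separate passes building four intermediate strings; B fuses them into a single accumulator pass over the post-step-4 string that skips vowels, maps each consonant, and appends only when the mapped char differs from the last emitted one.
import Mathlib
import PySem

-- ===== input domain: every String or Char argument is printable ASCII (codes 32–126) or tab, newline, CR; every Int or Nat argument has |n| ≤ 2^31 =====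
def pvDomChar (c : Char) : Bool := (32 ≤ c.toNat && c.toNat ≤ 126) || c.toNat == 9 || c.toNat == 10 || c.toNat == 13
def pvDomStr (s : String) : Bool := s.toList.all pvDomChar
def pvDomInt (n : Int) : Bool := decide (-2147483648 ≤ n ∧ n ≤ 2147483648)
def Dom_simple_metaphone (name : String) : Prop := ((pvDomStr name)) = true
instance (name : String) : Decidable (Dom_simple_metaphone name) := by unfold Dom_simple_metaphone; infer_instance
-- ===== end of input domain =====

-- B fuses A's four steps-5-to-7 passes (drop vowels / compress / phonetic map / compress)
-- into one accumulator loop (objective: simpler — one pass instead of four).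

-- shared constant: set('AEIOU')
def pvVowelU (c : Char) : Bool := c == 'A' || c == 'E' || c == 'I' || c == 'O' || c == 'U'

-- ===== PORT A =====
-- step 4 while loop: length of the initial vowel run
def pvVowelRunA : List Char → Nat
  | [] => 0
  | c :: cs => if pvVowelU c then pvVowelRunA cs + 1 else 0

-- step 5 loop over s[1:]: keep non-vowels
def pvDropVowelsA : List Char → List Char
  | [] => []
  | c :: cs => if pvVowelU c then pvDropVowelsA cs else c :: pvDropVowelsA cs

-- step 6 loop: append ch when it differs from the last appended char
def pvCompressGoA (last : Char) : List Char → List Char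
  | [] => []
  | c :: cs => if c ≠ last then c :: pvCompressGoA c cs else pvCompressGoA last cs

-- "compressed = result[0] if result else ''" plus the loop
def pvCompressA : List Char → List Char
  | [] => []
  | c :: cs => c :: pvCompressGoA c cs

-- step 7 mapping branch chain
def pvMetaA (c : Char) : Char :=
  if c == 'C' then 'K' else if c == 'G' then 'K' else if c == 'J' then 'Y'
  else if c == 'V' then 'F' else if c == 'Z' then 'S' else c

-- step 7 loop
def pvMapA : List Char → List Char
  | [] => []
  | c :: cs => pvMetaA c :: pvMapA cs

-- steps 5–8 on the post-step-4 string (first char kept as-is by step 5)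
def pvStepsA : List Char → String
  | [] => ""
  | c :: rest => String.ofList ((pvCompressA (pvMapA (pvCompressA (c :: pvDropVowelsA rest)))).take 6)

def simple_metaphone (name : String) : String :=
  if name = "" then "" else
  let s0 := PySem.Str.upper name
  let s1 := if 4 < PySem.Str.len s0 && PySem.Str.endswith s0 "S"
            then PySem.Str.slice s0 none (some (-1)) else s0
  let s2 := PySem.Str.replace (PySem.Str.replace (PySem.Str.replace
              (PySem.Str.replace s1 "SCH" "SK") "PH" "F") "CK" "K") "QU" "KW"
  let s3 := if PySem.Str.startswith s2 "KN" then PySem.Str.slice s2 (some 1) none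
            else if PySem.Str.startswith s2 "GN" then PySem.Str.slice s2 (some 1) none
            else if PySem.Str.startswith s2 "AE" then PySem.Str.slice s2 (some 1) none
            else if PySem.Str.startswith s2 "WR" then PySem.Str.slice s2 (some 1) none
            else s2
  if s3 = "" then "" else
  let l := s3.toList
  let i := pvVowelRunA l
  let l2 := if 0 < i then 'A' :: l.drop i else l
  if l2 = [] then "A" else pvStepsA l2

-- ===== PORT B =====
-- phon = {'C':'K','G':'K','J':'Y','V':'F','Z':'S'}
def pvPhonB : PySem.Dict Char Char :=
  PySem.Dict.mk [('C', 'K'), ('G', 'K'), ('J', 'Y'), ('V', 'F'), ('Z', 'S')]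

-- step 4 while loop (same code as in A)
def pvVowelRunB : List Char → Nat
  | [] => 0
  | c :: cs => if pvVowelU c then pvVowelRunB cs + 1 else 0

-- the fused loop over s[1:]: skip vowels, map, append when different from out[-1]
def pvFuseGoB (last : Char) : List Char → List Char
  | [] => []
  | c :: cs =>
      if pvVowelU c then pvFuseGoB last cs
      else
        let m := pvPhonB.getD c c
        if m ≠ last then m :: pvFuseGoB m cs else pvFuseGoB last cs

-- out = [phon.get(s[0], s[0])]; the loop; ''.join(out[:6])
def pvStepsB : List Char → String
  | [] => ""
  | c :: rest =>
      let m0 := pvPhonB.getD c c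
      String.ofList ((m0 :: pvFuseGoB m0 rest).take 6)

def simple_metaphone_alt (name : String) : String :=
  if name = "" then "" else
  let s0 := PySem.Str.upper name
  let s1 := if 4 < PySem.Str.len s0 && PySem.Str.endswith s0 "S"
            then PySem.Str.slice s0 none (some (-1)) else s0
  let s2 := PySem.Str.replace (PySem.Str.replace (PySem.Str.replace
              (PySem.Str.replace s1 "SCH" "SK") "PH" "F") "CK" "K") "QU" "KW"
  let s3 := if PySem.Str.slice s2 none (some 2) ∈ ["KN", "GN", "AE", "WR"]
            then PySem.Str.slice s2 (some 1) none else s2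
  if s3 = "" then "" else
  let l := s3.toList
  let i := pvVowelRunB l
  let l2 := if 0 < i then 'A' :: l.drop i else l
  pvStepsB l2

-- ===== PRECONDITION & SPEC =====
def Spec_simple_metaphone (name : String) (out : String) : Prop := out = simple_metaphone_alt name
instance (name : String) (out : String) : Decidable (Spec_simple_metaphone name out) := by unfold Spec_simple_metaphone; infer_instance

-- ===== CLAIM (what is proved, stated in full; the proofs are below) =====
def Claim_equal_simple_metaphone : Prop := ∀ (name : String), Dom_simple_metaphone name → Spec_simple_metaphone name (simple_metaphone name)

-- ===== LEMMAS AND PROOFS =====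

lemma pvVowelRun_eq (l : List Char) : pvVowelRunB l = pvVowelRunA l := by
  induction l with
  | nil => rfl
  | cons c cs ih => simp [pvVowelRunA, pvVowelRunB, ih]

lemma pvPhon_eq (c : Char) : pvPhonB.getD c c = pvMetaA c := by
  by_cases h1 : c = 'C'
  · subst h1; decide
  by_cases h2 : c = 'G'
  · subst h2; decide
  by_cases h3 : c = 'J'
  · subst h3; decide
  by_cases h4 : c = 'V'
  · subst h4; decide
  by_cases h5 : c = 'Z'
  · subst h5; decide
  have b1 : ('C' == c) = false := by simp [Ne.symm h1]
  have b2 : ('G' == c) = false := by simp [Ne.symm h2]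
  have b3 : ('J' == c) = false := by simp [Ne.symm h3]
  have b4 : ('V' == c) = false := by simp [Ne.symm h4]
  have b5 : ('Z' == c) = false := by simp [Ne.symm h5]
  simp [pvPhonB, pvMetaA, PySem.Dict.getD, PySem.Dict.get?, List.find?,
        h1, h2, h3, h4, h5, b1, b2, b3, b4, b5]

-- the fused loop = compress-after-map of the vowel-dropped tail
lemma pvFuse_eq (l : List Char) (last : Char) :
    pvFuseGoB last l = pvCompressGoA last (pvMapA (pvDropVowelsA l)) := by
  induction l generalizing last with
  | nil => rfl
  | cons c cs ih =>
      by_cases hv : pvVowelU c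
      · simp [pvFuseGoB, pvDropVowelsA, hv, ih]
      · by_cases hm : pvMetaA c = last <;>
          simp [pvFuseGoB, pvDropVowelsA, pvMapA, pvCompressGoA, hv, hm, pvPhon_eq, ih]

-- one compression after mapping absorbs a compression before mapping
lemma pvCompressMapCompress (l : List Char) (a : Char) :
    pvCompressGoA (pvMetaA a) (pvMapA (pvCompressGoA a l)) =
      pvCompressGoA (pvMetaA a) (pvMapA l) := by
  induction l generalizing a with
  | nil => rfl
  | cons c cs ih =>
      by_cases hc : c = a
      · subst hc
        simp [pvCompressGoA, pvMapA, ih]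
      · have e1 : pvCompressGoA a (c :: cs) = c :: pvCompressGoA c cs := by
          simp [pvCompressGoA, hc]
        by_cases hm : pvMetaA c = pvMetaA a
        · have e3 : ∀ t, pvCompressGoA (pvMetaA a) (pvMetaA c :: t) =
              pvCompressGoA (pvMetaA a) t := by
            intro t; simp [pvCompressGoA, hm]
          rw [e1, show pvMapA (c :: pvCompressGoA c cs)
                = pvMetaA c :: pvMapA (pvCompressGoA c cs) from rfl, e3,
              show pvMapA (c :: cs) = pvMetaA c :: pvMapA cs from rfl, e3, ← hm]
          exact ih c
        · have e3 : ∀ t, pvCompressGoA (pvMetaA a) (pvMetaA c :: t) =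
              pvMetaA c :: pvCompressGoA (pvMetaA c) t := by
            intro t; simp [pvCompressGoA, hm]
          rw [e1, show pvMapA (c :: pvCompressGoA c cs)
                = pvMetaA c :: pvMapA (pvCompressGoA c cs) from rfl, e3,
              show pvMapA (c :: cs) = pvMetaA c :: pvMapA cs from rfl, e3, ih c]

lemma pvSteps_eq (c : Char) (rest : List Char) :
    pvStepsA (c :: rest) = pvStepsB (c :: rest) := by
  simp only [pvStepsA, pvStepsB, pvCompressA, pvMapA, pvPhon_eq]
  rw [pvCompressMapCompress, pvFuse_eq]

-- A's step-3 elif chain = B's prefix-membership test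
lemma pvStep3_eq (s : String) :
    (if PySem.Str.startswith s "KN" then PySem.Str.slice s (some 1) none
     else if PySem.Str.startswith s "GN" then PySem.Str.slice s (some 1) none
     else if PySem.Str.startswith s "AE" then PySem.Str.slice s (some 1) none
     else if PySem.Str.startswith s "WR" then PySem.Str.slice s (some 1) none
     else s)
    = (if PySem.Str.slice s none (some 2) ∈ ["KN", "GN", "AE", "WR"]
       then PySem.Str.slice s (some 1) none else s) := by
  have key : ∀ p : String, p.toList.length = 2 →
      (PySem.Str.startswith s p = true ↔ PySem.Str.slice s none (some 2) = p) := by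
    intro p hp
    have hsl : (PySem.Str.slice s none (some 2)).toList = s.toList.take 2 := by
      simp [PySem.Str.slice, PySem.List.slice_to s.toList (by norm_num : (0:Int) ≤ 2)]
    constructor
    · intro h
      have : p.toList <+: s.toList := by
        have := (PySem.Chars.startswith_iff s.toList p.toList).mp
        simp [PySem.Str.startswith] at h
        exact this h
      have := List.prefix_iff_eq_take.mp this
      rw [hp] at this
      apply String.toList_injective
      rw [hsl, ← this]
    · intro h
      have : p.toList = s.toList.take 2 := by rw [← hsl, h]
      have hpre : p.toList <+: s.toList := by
        rw [List.prefix_iff_eq_take, hp, ← this]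
      simp [PySem.Str.startswith]
      exact (PySem.Chars.startswith_iff s.toList p.toList).mpr hpre
  by_cases h1 : PySem.Str.startswith s "KN" = true
  · have hm : PySem.Str.slice s none (some 2) ∈ (["KN", "GN", "AE", "WR"] : List String) := by
      rw [(key "KN" rfl).mp h1]; decide
    rw [if_pos h1, if_pos hm]
  · by_cases h2 : PySem.Str.startswith s "GN" = true
    · have hm : PySem.Str.slice s none (some 2) ∈ (["KN", "GN", "AE", "WR"] : List String) := by
        rw [(key "GN" rfl).mp h2]; decide
      rw [if_neg h1, if_pos h2, if_pos hm]
    · by_cases h3 : PySem.Str.startswith s "AE" = true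
      · have hm : PySem.Str.slice s none (some 2) ∈ (["KN", "GN", "AE", "WR"] : List String) := by
          rw [(key "AE" rfl).mp h3]; decide
        rw [if_neg h1, if_neg h2, if_pos h3, if_pos hm]
      · by_cases h4 : PySem.Str.startswith s "WR" = true
        · have hm : PySem.Str.slice s none (some 2) ∈ (["KN", "GN", "AE", "WR"] : List String) := by
            rw [(key "WR" rfl).mp h4]; decide
          rw [if_neg h1, if_neg h2, if_neg h3, if_pos h4, if_pos hm]
        · have hm : PySem.Str.slice s none (some 2) ∉ (["KN", "GN", "AE", "WR"] : List String) := by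
            intro hmem
            simp only [List.mem_cons, List.not_mem_nil, or_false] at hmem
            rcases hmem with h | h | h | h
            · exact h1 ((key "KN" rfl).mpr h)
            · exact h2 ((key "GN" rfl).mpr h)
            · exact h3 ((key "AE" rfl).mpr h)
            · exact h4 ((key "WR" rfl).mpr h)
          rw [if_neg h1, if_neg h2, if_neg h3, if_neg h4, if_neg hm]

-- ===== VERDICT (by name: the statement is the Claim_ definition above) =====
theorem simple_metaphone_spec : Claim_equal_simple_metaphone := by
  intro name _
  unfold Spec_simple_metaphone simple_metaphone simple_metaphone_alt
  by_cases h0 : name = ""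
  · simp [h0]
  · simp only [h0, if_false, pvStep3_eq, pvVowelRun_eq]
    generalize (if PySem.Str.slice _ none (some 2) ∈ (["KN", "GN", "AE", "WR"] : List String)
                then _ else _) = s3
    by_cases hs : s3 = ""
    · simp [hs]
    · simp only [hs, if_false]
      have hl : s3.toList ≠ [] := fun h => hs (String.toList_eq_nil_iff.mp h)
      by_cases hi : 0 < pvVowelRunA s3.toList
      · simp only [hi, if_true]
        have : ('A' :: s3.toList.drop (pvVowelRunA s3.toList)) ≠ [] := by simp
        simp only [this, if_false]
        exact pvSteps_eq _ _
      · simp only [hi, if_false]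
        cases h : s3.toList with
        | nil => exact absurd h hl
        | cons c rest => simp [pvSteps_eq]
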